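-- pv_equiv track=rewrite | github.com/jake-albert/py-algs | c17/c17p15.py | long_to_short
-- ===== SOURCE A (Python) =====
-- def long_to_short(lst):
--     """Given a list of words, generates indices to words in decreasing
--     order by length. Equally long words are yielded in arbitrary order.
--
--     Args:
--         lst: A list of strings.
--
--     Yields:
--         Lists of int indices to lst.
--     """
--     buckets = [[]]  # buckets[x] to hold indices to words of length x.
--
--     for i,word in enumerate(lst):
--         while len(word) >= len(buckets):
--             buckets.append([])
--         buckets[len(word)].append(i)
--
--     for b in range(len(buckets)-1,0,-1):  # Ignore empty strings.
--         for word_index in buckets[b]: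
--             yield word_index
-- ===== SOURCE B (Python) =====
-- def long_to_short(lst):
--     nonempty = [i for i, word in enumerate(lst) if word]
--     yield from sorted(nonempty, key=lambda i: -len(lst[i]))
-- ===== Notes on version B (the rewrite author's own statement) =====
-- stated objective: idiomatic
-- what changed: Replaces the padded bucket-list build plus reverse bucket walk with one stable sort of the non-empty word indices keyed on decreasing length.
import Mathlib
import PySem

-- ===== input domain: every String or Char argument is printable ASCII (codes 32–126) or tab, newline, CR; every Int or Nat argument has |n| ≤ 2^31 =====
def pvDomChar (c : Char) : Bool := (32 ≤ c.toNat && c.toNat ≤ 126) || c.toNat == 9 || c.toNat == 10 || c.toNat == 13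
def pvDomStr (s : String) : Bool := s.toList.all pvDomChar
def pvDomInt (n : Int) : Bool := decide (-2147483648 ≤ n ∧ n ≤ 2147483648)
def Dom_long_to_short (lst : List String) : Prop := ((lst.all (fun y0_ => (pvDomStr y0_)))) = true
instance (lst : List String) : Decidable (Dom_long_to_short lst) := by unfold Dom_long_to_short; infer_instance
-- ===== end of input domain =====

-- B replaces A's padded bucket-list build and reverse bucket walk with one stable sort
-- of the non-empty word indices keyed on decreasing length (idiomatic; same results).


-- ===== PORT A =====
-- 'while len(word) >= len(buckets): buckets.append([])'
def pvPad (n : Nat) (bks : List (List Int)) : List (List Int) :=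
  if bks.length ≤ n then pvPad n (bks ++ [[]]) else bks
termination_by n + 1 - bks.length
decreasing_by simp; omega

def long_to_short (lst : List String) : List Int :=
  let buckets := (PySem.List.enumerate lst).foldl
    (fun bks p =>
      let bks' := pvPad p.2.toList.length bks
      bks'.modify p.2.toList.length (fun b => b ++ [p.1])) [[]]
  -- for b in range(len(buckets)-1, 0, -1): for word_index in buckets[b]: yield word_index
  (PySem.List.pyRange ((buckets.length : Int) - 1) 0 (-1)).foldl
    (fun acc b => acc ++ PySem.List.pyGetD buckets b []) []

-- ===== PORT B =====
def long_to_short_alt (lst : List String) : List Int :=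
  let nonempty : List Int := (PySem.List.enumerate lst).filterMap
    (fun p => if p.2.toList.length ≠ 0 then some p.1 else none)
  PySem.List.sorted nonempty
    (fun i => -(((PySem.List.pyGet? lst i).getD "").toList.length : Int)) false

-- ===== PRECONDITION & SPEC =====
def Spec_long_to_short (lst : List String) (out : List Int) : Prop := out = long_to_short_alt lst
instance (lst : List String) (out : List Int) : Decidable (Spec_long_to_short lst out) := by unfold Spec_long_to_short; infer_instance

-- ===== CLAIM (what is proved, stated in full; the proofs are below) =====
def Claim_equal_long_to_short : Prop := ∀ (lst : List String), Dom_long_to_short lst → Spec_long_to_short lst (long_to_short lst)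

-- ===== LEMMAS AND PROOFS =====
def keyf (lst : List String) (i : Int) : Int :=
  -(((PySem.List.pyGet? lst i).getD "").toList.length : Int)

/-- Concatenation of buckets 1.. in decreasing index order: what A's final loop emits. -/
def flat (bks : List (List Int)) : List Int := (bks.drop 1).reverse.flatten

/-- Bucket l holds only indices whose word has length l. -/
def BkInv (lst : List String) (bks : List (List Int)) : Prop :=
  ∀ (l : Nat) (hl : l < bks.length), ∀ j ∈ bks[l], keyf lst j = -(l : Int)

/-- A's loop body for one word. -/
def stepA (bks : List (List Int)) (p : Int × String) : List (List Int) :=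
  (pvPad p.2.toList.length bks).modify p.2.toList.length (fun b => b ++ [p.1])

lemma pvPad_eq (n : Nat) (bks : List (List Int)) :
    pvPad n bks = bks ++ List.replicate (n + 1 - bks.length) [] := by
  fun_induction pvPad n bks with
  | case1 bks h ih =>
      rw [ih]
      have h2 : n + 1 - bks.length = (n - bks.length) + 1 := by omega
      simp [h2, List.replicate_succ]
  | case2 bks h =>
      have h2 : n + 1 - bks.length = 0 := by omega
      simp [h2]

lemma length_pvPad (n : Nat) (bks : List (List Int)) :
    (pvPad n bks).length = max bks.length (n + 1) := by
  rw [pvPad_eq]; simp; omega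

lemma flat_pvPad (n : Nat) (bks : List (List Int)) (h : bks ≠ []) :
    flat (pvPad n bks) = flat bks := by
  rw [pvPad_eq]
  have h1 : 1 ≤ bks.length := List.length_pos_iff.mpr h
  simp [flat, List.drop_append_of_le_length h1]

lemma BkInv_pvPad (lst : List String) (n : Nat) (bks : List (List Int))
    (h : BkInv lst bks) : BkInv lst (pvPad n bks) := by
  rw [pvPad_eq]
  intro l hl j hj
  by_cases hlb : l < bks.length
  · exact h l hlb j (by rwa [List.getElem_append_left hlb] at hj)
  · rw [List.getElem_append_right (le_of_not_gt hlb)] at hj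
    simp at hj

lemma BkInv_modify (lst : List String) (bks : List (List Int)) (i : Int) (l : Nat)
    (h : BkInv lst bks) (hk : keyf lst i = -(l : Int)) :
    BkInv lst (bks.modify l (fun b => b ++ [i])) := by
  intro m hm j hj
  rw [List.length_modify] at hm
  rw [List.getElem_modify] at hj
  by_cases hml : l = m
  · subst hml
    simp at hj
    rcases hj with hj | hj
    · exact h l hm j hj
    · subst hj; exact hk
  · rw [if_neg hml] at hj
    exact h m hm j hj

lemma insertBy_append_left {α : Type} (f : α → α → Bool) (x : α) (as bs : List α)
    (h : ∀ y ∈ as, f x y = false) :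
    PySem.List.insertBy f x (as ++ bs) = as ++ PySem.List.insertBy f x bs := by
  induction as with
  | nil => simp
  | cons a as ih =>
      have ha : f x a = false := h a (List.mem_cons_self)
      simp only [List.cons_append, PySem.List.insertBy, ha]
      simp only [Bool.false_eq_true, if_false]
      rw [ih (fun y hy => h y (List.mem_cons_of_mem a hy))]

lemma insertBy_all_before {α : Type} (f : α → α → Bool) (x : α) (bs : List α)
    (h : ∀ y ∈ bs, f x y = true) :
    PySem.List.insertBy f x bs = x :: bs := by
  cases bs with
  | nil => rfl
  | cons b bs => simp [PySem.List.insertBy, h b List.mem_cons_self]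

lemma modify_append_len {α : Type} (u : List α) (c : α) (v : List α) (f : α → α) :
    (u ++ c :: v).modify u.length f = u ++ f c :: v := by
  induction u with
  | nil => simp
  | cons a u ih => simpa using ih

/-- Key fact: appending i at the end of bucket l (1 ≤ l) is a stable insertion into
    the flattened decreasing-length output. -/
lemma flat_modify_step (lst : List String) (bks : List (List Int)) (i : Int) (l : Nat)
    (hinv : BkInv lst bks) (hl : l < bks.length) (hl1 : 1 ≤ l)
    (hk : keyf lst i = -(l : Int)) :
    flat (bks.modify l (fun b => b ++ [i]))
      = PySem.List.insertBy (fun a b => decide (keyf lst a < keyf lst b)) i (flat bks) := by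
  obtain ⟨b0, rest, rfl⟩ : ∃ b0 rest, bks = b0 :: rest := by
    cases bks with
    | nil => simp at hl
    | cons b0 rest => exact ⟨b0, rest, rfl⟩
  obtain ⟨m, rfl⟩ : ∃ m, l = m + 1 := ⟨l - 1, by omega⟩
  have hm : m < rest.length := by simpa using hl
  set u := rest.take m with hu
  set c := rest[m] with hc
  set v := rest.drop (m + 1) with hv
  have hrest : rest = u ++ c :: v := by
    rw [hu, hc, hv, ← List.drop_eq_getElem_cons hm, List.take_append_drop]
  have hulen : u.length = m := by simp [hu]; omega
  -- keys of elements of u / c / v via the invariant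
  have hkey_u : ∀ y ∈ u.reverse.flatten, keyf lst i < keyf lst y := by
    intro y hy
    simp only [List.mem_flatten, List.mem_reverse] at hy
    obtain ⟨bl, hbl, hybl⟩ := hy
    obtain ⟨t, ht, rfl⟩ := List.mem_iff_getElem.mp hbl
    have ht' : t < m := by simpa [hulen] using ht
    have : u[t] = (b0 :: rest)[t+1] := by
      simp [hu, List.getElem_take]
    rw [this] at hybl
    have := hinv (t+1) (by simp; omega) y hybl
    rw [hk, this]
    push_cast
    omega
  have hkey_c : ∀ y ∈ c, ¬ (keyf lst i < keyf lst y) := by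
    intro y hy
    have hcb : c = (b0 :: rest)[m+1] := by simp [hc]
    rw [hcb] at hy
    have := hinv (m+1) (by simp; omega) y hy
    rw [hk, this]
    omega
  have hkey_v : ∀ y ∈ v.reverse.flatten, ¬ (keyf lst i < keyf lst y) := by
    intro y hy
    simp only [List.mem_flatten, List.mem_reverse] at hy
    obtain ⟨bl, hbl, hybl⟩ := hy
    obtain ⟨t, ht, rfl⟩ := List.mem_iff_getElem.mp hbl
    have hvlen : v.length = rest.length - (m + 1) := by simp [hv]
    have ht2 : m+2+t < (b0 :: rest).length := by
      simp only [List.length_cons]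
      omega
    have harr : (b0 :: rest)[m+2+t]'ht2 = v[t]'ht := by
      have he : m+2+t = (m+1+t)+1 := by omega
      simp only [hv, List.getElem_drop, he, List.getElem_cons_succ]
    rw [← harr] at hybl
    have := hinv (m+2+t) ht2 y hybl
    rw [hk, this]
    push_cast
    omega
  -- compute both sides
  rw [List.modify_succ_cons]
  conv_lhs => rw [hrest, ← hulen, modify_append_len]
  have hflat1 : flat (b0 :: (u ++ (c ++ [i]) :: v)) =
      v.reverse.flatten ++ (c ++ [i] ++ u.reverse.flatten) := by
    simp [flat]
  have hflat2 : flat (b0 :: rest) = (v.reverse.flatten ++ c) ++ u.reverse.flatten := by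
    rw [hrest]; simp [flat]
  rw [hflat1, hflat2]
  rw [insertBy_append_left _ _ _ _ (by
    intro y hy
    simp only [List.mem_append] at hy
    rcases hy with hy | hy
    · simp [hkey_v y hy]
    · simp [hkey_c y hy])]
  rw [insertBy_all_before _ _ _ (by
    intro y hy
    simp [hkey_u y hy])]
  simp

lemma flat_modify_zero (bks : List (List Int)) (f : List Int → List Int) (h : bks ≠ []) :
    flat (bks.modify 0 f) = flat bks := by
  cases bks with
  | nil => simp at h
  | cons b0 rest => simp [flat]

/-- One step of A's build loop, seen on the flattened output. -/
lemma flat_stepA (lst : List String) (bks : List (List Int)) (p : Int × String)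
    (hne : bks ≠ []) (hinv : BkInv lst bks)
    (hp : keyf lst p.1 = -(p.2.toList.length : Int)) :
    flat (stepA bks p) =
      if p.2.toList.length ≠ 0 then
        PySem.List.insertBy (fun a b => decide (keyf lst a < keyf lst b)) p.1 (flat bks)
      else flat bks := by
  unfold stepA
  have hlen : p.2.toList.length < (pvPad p.2.toList.length bks).length := by
    rw [length_pvPad]; omega
  have hinv' := BkInv_pvPad lst p.2.toList.length bks hinv
  have hne' : pvPad p.2.toList.length bks ≠ [] := by
    intro hcon
    rw [hcon] at hlen
    simp at hlen
  by_cases h0 : p.2.toList.length = 0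
  · rw [if_neg (by omega)]
    rw [h0] at hne' ⊢
    rw [flat_modify_zero _ _ hne', flat_pvPad _ _ hne]
  · rw [if_pos h0]
    rw [flat_modify_step lst _ p.1 _ hinv' hlen (by omega) hp, flat_pvPad _ _ hne]

lemma stepA_ne_nil (bks : List (List Int)) (p : Int × String) :
    stepA bks p ≠ [] := by
  unfold stepA
  intro hcon
  have := congrArg List.length hcon
  rw [List.length_modify, length_pvPad] at this
  simp at this

lemma BkInv_stepA (lst : List String) (bks : List (List Int)) (p : Int × String)
    (hinv : BkInv lst bks) (hp : keyf lst p.1 = -(p.2.toList.length : Int)) :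
    BkInv lst (stepA bks p) :=
  BkInv_modify lst _ p.1 _ (BkInv_pvPad lst _ _ hinv) hp

/-- The main loop correspondence. -/
lemma fold_eq (lst : List String) (ys : List (Int × String)) :
    ∀ (bks : List (List Int)), bks ≠ [] → BkInv lst bks →
    (∀ p ∈ ys, keyf lst p.1 = -(p.2.toList.length : Int)) →
    flat (ys.foldl stepA bks)
      = (ys.filterMap (fun p => if p.2.toList.length ≠ 0 then some p.1 else none)).foldl
          (fun acc x => PySem.List.insertBy (fun a b => decide (keyf lst a < keyf lst b)) x acc)
          (flat bks) := by
  induction ys with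
  | nil => intro bks _ _ _; rfl
  | cons p ys ih =>
      intro bks hne hinv hkeys
      have hp := hkeys p List.mem_cons_self
      have hkeys' : ∀ q ∈ ys, keyf lst q.1 = -(q.2.toList.length : Int) :=
        fun q hq => hkeys q (List.mem_cons_of_mem p hq)
      rw [List.foldl_cons, ih (stepA bks p) (stepA_ne_nil bks p)
            (BkInv_stepA lst bks p hinv hp) hkeys']
      rw [flat_stepA lst bks p hne hinv hp]
      by_cases h0 : p.2.toList.length ≠ 0
      · simp only [List.filterMap_cons, if_pos h0, List.foldl_cons]
      · simp only [List.filterMap_cons, if_neg h0]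

lemma enumerate_keys (lst : List String) :
    ∀ p ∈ PySem.List.enumerate lst 0, keyf lst p.1 = -(p.2.toList.length : Int) := by
  intro p hp
  rw [PySem.List.mem_enumerate_iff] at hp
  obtain ⟨k, hk, rfl⟩ := hp
  simp only [keyf, zero_add]
  rw [PySem.List.pyGet?_natCast]
  simp [List.getElem?_eq_getElem hk]

/-- A's emitting loop over range(len-1, 0, -1) produces exactly `flat buckets`. -/
lemma rangeFold_eq (bks : List (List Int)) :
    (PySem.List.pyRange ((bks.length : Int) - 1) 0 (-1)).foldl
        (fun acc b => acc ++ PySem.List.pyGetD bks b []) []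
      = flat bks := by
  rw [PySem.List.foldl_append_eq_flatMap, List.nil_append]
  have h1 : PySem.List.pyRange ((bks.length : Int) - 1) 0 (-1)
      = (PySem.List.pyRange 1 (PySem.List.len bks)).reverse := by
    rw [PySem.List.pyRange_neg_one_eq_reverse]
    norm_num
  rw [h1, List.flatMap_def, List.map_reverse,
      PySem.List.map_pyGetD_pyRange bks [] (by norm_num)]
  simp [flat]

lemma foldl_stepA_ne_nil (ys : List (Int × String)) (bks : List (List Int)) (h : bks ≠ []) :
    ys.foldl stepA bks ≠ [] := by
  induction ys generalizing bks with
  | nil => exact h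
  | cons p ys ih => exact ih _ (stepA_ne_nil _ _)

-- ===== VERDICT (by name: the statement is the Claim_ definition above) =====

theorem long_to_short_spec : Claim_equal_long_to_short := by
  unfold Claim_equal_long_to_short
  intro lst _
  unfold Spec_long_to_short long_to_short long_to_short_alt
  have hstep : (fun (bks : List (List Int)) (p : Int × String) =>
      let bks' := pvPad p.2.toList.length bks
      bks'.modify p.2.toList.length (fun b => b ++ [p.1])) = stepA := rfl
  rw [hstep]
  have hinit : BkInv lst [[]] := by
    intro l hl j hj
    have hl0 : l = 0 := by simpa using hl
    subst hl0
    simp at hj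
  have hne : (PySem.List.enumerate lst 0).foldl stepA [[]] ≠ [] :=
    foldl_stepA_ne_nil _ _ (by simp)
  rw [rangeFold_eq, fold_eq lst _ [[]] (by simp) hinit (enumerate_keys lst),
      PySem.List.sorted_eq_foldl_insertBy]
  rfl
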